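-- pv_equiv track=rewrite | github.com/MrBrantCode/unitest_baseline | mut_generate/mist_train_taco/taco_2575/solution.py | min_steps_to_delete_string
-- ===== SOURCE A (Python) =====
-- def min_steps_to_delete_string(s: str) -> int:
--     def solve(s, dp, start, end):
--         if start > end:
--             return 0
--         if start == end:
--             return 1
--         if dp[start][end] != -1:
--             return dp[start][end]
--
--         op1 = op2 = op3 = float('inf')
--         op1 = 1 + solve(s, dp, start + 1, end)
--
--         if s[start] == s[start + 1]:
--             op2 = 1 + solve(s, dp, start + 2, end)
--
--         for i in range(start + 2, end + 1):
--             if s[start] == s[i]: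
--                 op3 = min(op3, solve(s, dp, start + 1, i - 1) + solve(s, dp, i + 1, end))
--
--         dp[start][end] = min(op1, op2, op3)
--         return dp[start][end]
--
--     n = len(s)
--     dp = [[-1 for _ in range(n)] for _ in range(n)]
--     return solve(s, dp, 0, n - 1)
-- ===== SOURCE B (Python) =====
-- def min_steps_to_delete_string(s: str) -> int:
--     n = len(s)
--     if n == 0:
--         return 0
--     dp = {}  # dp[(i, j)] = answer for s[i..j]; missing / i > j reads count as 0
--
--     def val(i, j):
--         return dp.get((i, j), 0)
--
--     for start in range(n - 1, -1, -1):
--         dp[(start, start)] = 1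
--         for end in range(start + 1, n):
--             best = 1 + val(start + 1, end)
--             if s[start] == s[start + 1]:
--                 best = min(best, 1 + val(start + 2, end))
--             for i in range(start + 2, end + 1):
--                 if s[start] == s[i]:
--                     best = min(best, val(start + 1, i - 1) + val(i + 1, end))
--             dp[(start, end)] = best
--     return dp[(0, n - 1)]
-- ===== Notes on version B (the rewrite author's own statement) =====
-- stated objective: alternative
-- what changed: Replaced the memoized top-down recursion (nested solve with a -1-initialised cache mutated in place) by an iterative bottom-up interval DP that fills a table row by row in decreasing start and returns dp[0][n-1].
import Mathlib
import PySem

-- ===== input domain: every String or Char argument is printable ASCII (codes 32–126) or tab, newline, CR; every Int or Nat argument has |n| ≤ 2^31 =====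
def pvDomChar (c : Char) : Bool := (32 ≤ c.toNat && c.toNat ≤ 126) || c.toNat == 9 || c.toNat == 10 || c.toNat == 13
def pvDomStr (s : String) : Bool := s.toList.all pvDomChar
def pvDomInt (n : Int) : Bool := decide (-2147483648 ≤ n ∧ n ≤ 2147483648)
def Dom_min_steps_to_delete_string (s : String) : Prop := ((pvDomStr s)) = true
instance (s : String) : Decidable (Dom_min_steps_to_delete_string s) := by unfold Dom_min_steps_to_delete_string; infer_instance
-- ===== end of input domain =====

-- B is an iterative bottom-up interval DP computing the same minimum-deletion-steps value as A's
-- memoized top-down recursion (objective: alternative; same asymptotic cost, no claim of speed).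

-- s[i] for an index known to be in range (both ports index only inside the string)
def pvChr (cs : List Char) (i : Int) : Char := PySem.List.pyGetD cs i ' '

-- Python's min(op1, op2, op3) where op2/op3 may still be float('inf') (= none) but op1 is an int
def pvOmin (a : Int) (o : Option Int) : Int :=
  match o with
  | none => a
  | some b => min a b

def pvMin3 (op1 : Int) (op2 op3 : Option Int) : Int := pvOmin (pvOmin op1 op2) op3

-- termination facts for the interval recursions, cited by name from decreasing_by
theorem pvArithL1 (start end_ : Int) (k : Nat) (h : ¬ start + 2 + (k : Int) > end_) :
    (start + 2 + (k : Int) - 1 - (start + 1)).toNat < (end_ - start).toNat := by omega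
theorem pvArithL2 (start end_ : Int) (k : Nat) (h : ¬ start + 2 + (k : Int) > end_) :
    (end_ - (start + 2 + (k : Int) + 1)).toNat < (end_ - start).toNat := by omega
theorem pvArithL3b (start end_ : Int) (k : Nat) (h : ¬ start + 2 + (k : Int) > end_) :
    (end_ - start - 1 - ((k : Int) + 1)).toNat < (end_ - start).toNat - 1 - k := by omega
theorem pvArithS1 (start end_ : Int) (h1 : ¬ start > end_) (h2 : ¬ start = end_) :
    (end_ - (start + 1)).toNat < (end_ - start).toNat := by omega
theorem pvArithS2 (start end_ : Int) (h1 : ¬ start > end_) (h2 : ¬ start = end_) :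
    (end_ - (start + 2)).toNat < (end_ - start).toNat := by omega
theorem pvArithS3b (start end_ : Int) (h1 : ¬ start > end_) (h2 : ¬ start = end_) :
    (end_ - start).toNat - 1 < (end_ - start).toNat := by omega

-- ===== PORT A =====
-- A's dp (an n×n list of lists initialised to -1 and written only at in-range pairs start ≤ end)
-- is modeled exactly by a finite map read with default -1 and threaded through the recursion.
-- The for-loop over i in range(start+2, end+1) is the recursion on the counter k (i = start+2+k).
mutual
def pvSolveLoop (cs : List Char) (start end_ : Int) (k : Nat) (op3 : Option Int)
    (dp : PySem.Dict (Int × Int) Int) : Option Int × PySem.Dict (Int × Int) Int :=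
  if h : start + 2 + k > end_ then (op3, dp)
  else
    let i : Int := start + 2 + k
    if pvChr cs start = pvChr cs i then
      let r1 := pvSolve cs (start + 1) (i - 1) dp
      let r2 := pvSolve cs (i + 1) end_ r1.2
      let v := r1.1 + r2.1
      pvSolveLoop cs start end_ (k + 1)
        (some (match op3 with | none => v | some a => min a v)) r2.2
    else
      pvSolveLoop cs start end_ (k + 1) op3 dp
termination_by ((end_ - start).toNat, (end_ - start - 1 - k).toNat)
decreasing_by
  all_goals simp_wf
  all_goals intros
  all_goals first
    | (apply Prod.Lex.left
       first
        | exact pvArithL1 _ _ _ ‹_›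
        | exact pvArithL2 _ _ _ ‹_›
        | exact pvArithS1 _ _ ‹_› ‹_›
        | exact pvArithS2 _ _ ‹_› ‹_›)
    | (apply Prod.Lex.right'
       case _ => exact Nat.le_refl _
       case _ => first
        | exact pvArithL3b _ _ _ ‹_›
        | exact pvArithS3b _ _ ‹_› ‹_›)

def pvSolve (cs : List Char) (start end_ : Int) (dp : PySem.Dict (Int × Int) Int) :
    Int × PySem.Dict (Int × Int) Int :=
  if h1 : start > end_ then (0, dp)
  else if h2 : start = end_ then (1, dp)
  else if PySem.Dict.getD dp (start, end_) (-1) ≠ -1 then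
    (PySem.Dict.getD dp (start, end_) (-1), dp)
  else
    let r1 := pvSolve cs (start + 1) end_ dp
    let op1 : Int := 1 + r1.1
    let p2 : Option Int × PySem.Dict (Int × Int) Int :=
      if pvChr cs start = pvChr cs (start + 1) then
        let r2 := pvSolve cs (start + 2) end_ r1.2
        (some (1 + r2.1), r2.2)
      else (none, r1.2)
    let p3 := pvSolveLoop cs start end_ 0 none p2.2
    let v := pvMin3 op1 p2.1 p3.1
    (v, PySem.Dict.insert p3.2 (start, end_) v)
termination_by ((end_ - start).toNat, (end_ - start).toNat)
decreasing_by
  all_goals simp_wf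
  all_goals intros
  all_goals first
    | (apply Prod.Lex.left
       first
        | exact pvArithL1 _ _ _ ‹_›
        | exact pvArithL2 _ _ _ ‹_›
        | exact pvArithS1 _ _ ‹_› ‹_›
        | exact pvArithS2 _ _ ‹_› ‹_›)
    | (apply Prod.Lex.right'
       case _ => exact Nat.le_refl _
       case _ => first
        | exact pvArithL3b _ _ _ ‹_›
        | exact pvArithS3b _ _ ‹_› ‹_›)
end

def min_steps_to_delete_string (s : String) : Int :=
  let cs := s.toList
  let n : Int := cs.length
  (pvSolve cs 0 (n - 1) PySem.Dict.empty).1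

-- ===== PORT B =====
-- B's Python dict dp with dp.get((i,j), 0) is PySem.Dict … read with default 0.
def pvVal (dp : PySem.Dict (Int × Int) Int) (i j : Int) : Int := PySem.Dict.getD dp (i, j) 0

def pvRowB (cs : List Char) (n : Int) (dp : PySem.Dict (Int × Int) Int) (start : Int) :
    PySem.Dict (Int × Int) Int :=
  let dp := PySem.Dict.insert dp (start, start) 1
  (PySem.List.pyRange (start + 1) n 1).foldl (fun dp e =>
    let b0 : Int := 1 + pvVal dp (start + 1) e
    let b1 : Int :=
      if pvChr cs start = pvChr cs (start + 1) then min b0 (1 + pvVal dp (start + 2) e) else b0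
    let b2 : Int := (PySem.List.pyRange (start + 2) (e + 1) 1).foldl (fun b i =>
      if pvChr cs start = pvChr cs i then min b (pvVal dp (start + 1) (i - 1) + pvVal dp (i + 1) e)
      else b) b1
    PySem.Dict.insert dp (start, e) b2) dp

def min_steps_to_delete_string_alt (s : String) : Int :=
  let cs := s.toList
  let n : Int := cs.length
  if n = 0 then 0
  else
    let dp := (PySem.List.pyRange (n - 1) (-1) (-1)).foldl (pvRowB cs n) PySem.Dict.empty
    PySem.Dict.getD dp (0, n - 1) 0

-- ===== PRECONDITION & SPEC =====
def Spec_min_steps_to_delete_string (s : String) (out : Int) : Prop := out = min_steps_to_delete_string_alt s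
instance (s : String) (out : Int) : Decidable (Spec_min_steps_to_delete_string s out) := by unfold Spec_min_steps_to_delete_string; infer_instance

-- ===== CLAIM (what is proved, stated in full; the proofs are below) =====
def Claim_equal_min_steps_to_delete_string : Prop := ∀ (s : String), Dom_min_steps_to_delete_string s → Spec_min_steps_to_delete_string s (min_steps_to_delete_string s)

-- ===== LEMMAS AND PROOFS =====

-- The pure (cache-free) value both programs compute: the recurrence of A without the memo table.
mutual
def pvF (cs : List Char) (start end_ : Int) : Int :=
  if h1 : start > end_ then 0
  else if h2 : start = end_ then 1
  else
    let op1 : Int := 1 + pvF cs (start + 1) end_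
    let op2 : Option Int :=
      if pvChr cs start = pvChr cs (start + 1) then some (1 + pvF cs (start + 2) end_) else none
    pvMin3 op1 op2 (pvFLoop cs start end_ 0 none)
termination_by ((end_ - start).toNat, (end_ - start).toNat)
decreasing_by
  all_goals simp_wf
  all_goals intros
  all_goals first
    | (apply Prod.Lex.left
       first
        | exact pvArithL1 _ _ _ ‹_›
        | exact pvArithL2 _ _ _ ‹_›
        | exact pvArithS1 _ _ ‹_› ‹_›
        | exact pvArithS2 _ _ ‹_› ‹_›)
    | (apply Prod.Lex.right'
       case _ => exact Nat.le_refl _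
       case _ => first
        | exact pvArithL3b _ _ _ ‹_›
        | exact pvArithS3b _ _ ‹_› ‹_›)

def pvFLoop (cs : List Char) (start end_ : Int) (k : Nat) (op3 : Option Int) : Option Int :=
  if h : start + 2 + k > end_ then op3
  else
    let i : Int := start + 2 + k
    if pvChr cs start = pvChr cs i then
      let v := pvF cs (start + 1) (i - 1) + pvF cs (i + 1) end_
      pvFLoop cs start end_ (k + 1) (some (match op3 with | none => v | some a => min a v))
    else
      pvFLoop cs start end_ (k + 1) op3
termination_by ((end_ - start).toNat, (end_ - start - 1 - k).toNat)
decreasing_by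
  all_goals simp_wf
  all_goals intros
  all_goals first
    | (apply Prod.Lex.left
       first
        | exact pvArithL1 _ _ _ ‹_›
        | exact pvArithL2 _ _ _ ‹_›
        | exact pvArithS1 _ _ ‹_› ‹_›
        | exact pvArithS2 _ _ ‹_› ‹_›)
    | (apply Prod.Lex.right'
       case _ => exact Nat.le_refl _
       case _ => first
        | exact pvArithL3b _ _ _ ‹_›
        | exact pvArithS3b _ _ ‹_› ‹_›)
end

-- ----- A-side: the memoized recursion computes pvF -----
theorem pvF_of_gt (cs : List Char) (start end_ : Int) (h : start > end_) :
    pvF cs start end_ = 0 := by rw [pvF]; simp [h]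

def pvInv (cs : List Char) (dp : PySem.Dict (Int × Int) Int) : Prop :=
  ∀ p : Int × Int, PySem.Dict.getD dp p (-1) ≠ -1 →
    PySem.Dict.getD dp p (-1) = pvF cs p.1 p.2

theorem pvSolve_correct (cs : List Char) (start end_ : Int)
    (dp : PySem.Dict (Int × Int) Int) :
    pvInv cs dp →
      (pvSolve cs start end_ dp).1 = pvF cs start end_ ∧ pvInv cs (pvSolve cs start end_ dp).2 := by
  refine pvSolve.induct cs
    (fun start end_ k op3 dp => pvInv cs dp →
      (pvSolveLoop cs start end_ k op3 dp).1 = pvFLoop cs start end_ k op3 ∧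
      pvInv cs (pvSolveLoop cs start end_ k op3 dp).2)
    (fun start end_ dp => pvInv cs dp →
      (pvSolve cs start end_ dp).1 = pvF cs start end_ ∧
      pvInv cs (pvSolve cs start end_ dp).2)
    ?c1 ?c2 ?c3 ?c4 ?c5 ?c6 ?c7 start end_ dp
  case c1 =>
    intro start end_ k op3 dp hgt hInv
    rw [pvSolveLoop, pvFLoop]
    simp only [dif_pos hgt]
    exact ⟨by trivial, hInv⟩
  case c2 =>
    intro start end_ k op3 dp hle i heq r1 r2 v ih1 ih1' ih2 ih2' ihloop hInv
    obtain ⟨e1, v1⟩ := ih1 hInv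
    obtain ⟨e2, v2⟩ := ih2 v1
    obtain ⟨e3, v3⟩ := ihloop v2
    rw [pvSolveLoop, pvFLoop]
    simp only [i, r1, r2, v] at heq e1 e2 e3 v3 ⊢
    simp only [dif_neg hle, if_pos heq]
    rw [e1, e2] at e3 v3 ⊢
    exact ⟨e3, v3⟩
  case c3 =>
    intro start end_ k op3 dp hle i hne ihloop hInv
    obtain ⟨e3, v3⟩ := ihloop hInv
    rw [pvSolveLoop, pvFLoop]
    simp only [i] at hne ⊢
    simp only [dif_neg hle, if_neg hne]
    exact ⟨e3, v3⟩
  case c4 =>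
    intro start end_ dp hgt hInv
    rw [pvSolve]
    simp only [dif_pos hgt]
    exact ⟨(pvF_of_gt cs start end_ hgt).symm, hInv⟩
  case c5 =>
    intro end_ dp hgt hInv
    rw [pvSolve, pvF]
    simp only [dif_neg hgt]
    exact ⟨by simp, hInv⟩
  case c6 =>
    intro start end_ dp hgt hne hcache hInv
    rw [pvSolve]
    simp only [dif_neg hgt, dif_neg hne, if_pos hcache]
    exact ⟨hInv _ hcache, hInv⟩
  case c7 =>
    intro start end_ dp hgt hne hcache r1 p2 ih1 ih2 ih2' ihloop hInv
    obtain ⟨e1, v1⟩ := ih1 hInv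
    by_cases heq : pvChr cs start = pvChr cs (start + 1)
    · obtain ⟨e2, v2⟩ := ih2' v1
      obtain ⟨e3, v3⟩ := ihloop (by simpa [p2, heq] using v2)
      rw [pvSolve, pvF]
      simp only [dif_neg hgt, dif_neg hne, if_neg hcache, if_pos heq, dif_pos heq]
      simp only [r1, p2, dif_pos heq, if_pos heq] at e3 v3
      constructor
      · simp only [e1, e2] at e3 ⊢
        rw [e3]
      · refine fun p hp => ?_
        rw [PySem.Dict.getD_insert] at hp ⊢
        by_cases hpk : p = (start, end_)
        · simp only [if_pos hpk]
          subst hpk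
          rw [pvF]
          simp only [dif_neg hgt, dif_neg hne, if_pos heq]
          simp only [e1, e2] at e3 ⊢
          rw [e3]
        · simp only [if_neg hpk] at hp ⊢
          exact v3 p hp
    · obtain ⟨e3, v3⟩ := ihloop (by simpa [p2, heq] using v1)
      rw [pvSolve, pvF]
      simp only [dif_neg hgt, dif_neg hne, if_neg hcache, if_neg heq, dif_neg heq]
      simp only [r1, p2, dif_neg heq, if_neg heq] at e3 v3
      constructor
      · simp only [e1] at e3 ⊢
        rw [e3]
      · refine fun p hp => ?_
        rw [PySem.Dict.getD_insert] at hp ⊢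
        by_cases hpk : p = (start, end_)
        · simp only [if_pos hpk]
          subst hpk
          rw [pvF]
          simp only [dif_neg hgt, dif_neg hne, if_neg heq]
          simp only [e1] at e3 ⊢
          rw [e3]
        · simp only [if_neg hpk] at hp ⊢
          exact v3 p hp

-- ----- B-side: the bottom-up table computes pvF -----

-- the body of B's row loop, named so the fold can be peeled
def pvBody (cs : List Char) (n start : Int)
    (dp : PySem.Dict (Int × Int) Int) (e : Int) : PySem.Dict (Int × Int) Int :=
  let b0 : Int := 1 + pvVal dp (start + 1) e
  let b1 : Int :=
    if pvChr cs start = pvChr cs (start + 1) then min b0 (1 + pvVal dp (start + 2) e) else b0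
  let b2 : Int := (PySem.List.pyRange (start + 2) (e + 1) 1).foldl (fun b i =>
    if pvChr cs start = pvChr cs i then min b (pvVal dp (start + 1) (i - 1) + pvVal dp (i + 1) e)
    else b) b1
  PySem.Dict.insert dp (start, e) b2

theorem pvRowB_eq (cs : List Char) (n : Int) (dp : PySem.Dict (Int × Int) Int) (start : Int) :
    pvRowB cs n dp start =
      (PySem.List.pyRange (start + 1) n 1).foldl (pvBody cs n start)
        (PySem.Dict.insert dp (start, start) 1) := rfl

-- the pure Int-accumulator fold over matches equals the Option-accumulator pvFLoop
theorem pvLoop_bridge (cs : List Char) (start e : Int) :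
    ∀ (m : Nat) (k : Nat), (e - start - 1 - (k : Int)).toNat = m → ∀ (o : Option Int) (b : Int),
      (PySem.List.pyRange (start + 2 + (k : Int)) (e + 1) 1).foldl (fun b i =>
          if pvChr cs start = pvChr cs i then
            min b (pvF cs (start + 1) (i - 1) + pvF cs (i + 1) e)
          else b) (pvOmin b o)
        = pvOmin b (pvFLoop cs start e k o) := by
  intro m
  induction m with
  | zero =>
    intro k hk o b
    have hgt : start + 2 + (k : Int) > e := by omega
    rw [PySem.List.pyRange_one_eq_nil (by omega), pvFLoop]
    simp [hgt]
  | succ m ih =>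
    intro k hk o b
    have hle : ¬ start + 2 + (k : Int) > e := by omega
    rw [PySem.List.pyRange_one_cons (by omega), pvFLoop]
    simp only [dif_neg hle, List.foldl_cons]
    by_cases heq : pvChr cs start = pvChr cs (start + 2 + (k : Int))
    · simp only [if_pos heq]
      have step : min (pvOmin b o)
            (pvF cs (start + 1) (start + 2 + (k : Int) - 1) + pvF cs (start + 2 + (k : Int) + 1) e)
          = pvOmin b (some (match o with
              | none => pvF cs (start + 1) (start + 2 + (k : Int) - 1) + pvF cs (start + 2 + (k : Int) + 1) e
              | some a => min a (pvF cs (start + 1) (start + 2 + (k : Int) - 1) + pvF cs (start + 2 + (k : Int) + 1) e))) := by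
        cases o <;> simp [pvOmin, min_assoc]
      rw [step]
      have hcast : start + 2 + (k : Int) + 1 = start + 2 + ((k + 1 : Nat) : Int) := by push_cast; ring
      rw [hcast]
      exact ih (k + 1) (by omega) _ b
    · simp only [if_neg heq]
      have hcast : start + 2 + (k : Int) + 1 = start + 2 + ((k + 1 : Nat) : Int) := by push_cast; ring
      rw [hcast]
      exact ih (k + 1) (by omega) o b

-- table invariants
def TblOk (cs : List Char) (n t : Int) (dp : PySem.Dict (Int × Int) Int) : Prop :=
  ∀ i j : Int, PySem.Dict.getD dp (i, j) 0 =
    if t ≤ i ∧ i ≤ j ∧ j < n then pvF cs i j else 0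

def RowOk (cs : List Char) (n start e : Int) (dp : PySem.Dict (Int × Int) Int) : Prop :=
  ∀ i j : Int, PySem.Dict.getD dp (i, j) 0 =
    if (start + 1 ≤ i ∧ i ≤ j ∧ j < n) ∨ (i = start ∧ start ≤ j ∧ j < e) then pvF cs i j else 0

theorem pvBody_step (cs : List Char) (n start e : Int)
    (dp : PySem.Dict (Int × Int) Int) (h1 : start + 1 ≤ e) (h2 : e < n)
    (hrow : RowOk cs n start e dp) : RowOk cs n start (e + 1) (pvBody cs n start dp e) := by
  have hval : ∀ i j : Int, start + 1 ≤ i → j < n → pvVal dp i j = pvF cs i j := by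
    intro i j hi hj
    simp only [pvVal]
    rw [hrow i j]
    by_cases hij : i ≤ j
    · rw [if_pos (Or.inl ⟨hi, hij, hj⟩)]
    · rw [if_neg (by rintro (⟨_, h2, _⟩ | ⟨h1, _, _⟩) <;> omega),
        pvF_of_gt cs i j (by omega)]
  have hkey : pvBody cs n start dp e = PySem.Dict.insert dp (start, e) (pvF cs start e) := by
    simp only [pvBody]
    congr 1
    rw [PySem.List.foldl_congr_mem _ _ (fun b i =>
        if pvChr cs start = pvChr cs i then
          min b (pvF cs (start + 1) (i - 1) + pvF cs (i + 1) e)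
        else b) _
      (by
        intro acc x hx
        rw [PySem.List.mem_pyRange_one] at hx
        rw [hval (start + 1) (x - 1) (by omega) (by omega),
          hval (x + 1) e (by omega) h2])]
    have hb : (if pvChr cs start = pvChr cs (start + 1) then
          min (1 + pvVal dp (start + 1) e) (1 + pvVal dp (start + 2) e)
        else 1 + pvVal dp (start + 1) e)
        = pvOmin (1 + pvF cs (start + 1) e)
            (if pvChr cs start = pvChr cs (start + 1) then some (1 + pvF cs (start + 2) e)
             else none) := by
      rw [hval (start + 1) e (by omega) h2]
      by_cases hch : pvChr cs start = pvChr cs (start + 1)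
      · rw [if_pos hch, if_pos hch, hval (start + 2) e (by omega) h2]
        rfl
      · rw [if_neg hch, if_neg hch]
        rfl
    rw [hb]
    have hbr : ∀ b : Int,
        (PySem.List.pyRange (start + 2) (e + 1) 1).foldl (fun b i =>
          if pvChr cs start = pvChr cs i then
            min b (pvF cs (start + 1) (i - 1) + pvF cs (i + 1) e)
          else b) b
        = pvOmin b (pvFLoop cs start e 0 none) := by
      intro b
      have h := pvLoop_bridge cs start e (e - start - 1).toNat 0 (by simp) none b
      rw [show pvOmin b none = b from rfl] at h
      simp only [Nat.cast_zero, add_zero] at h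
      exact h
    rw [hbr]
    conv_rhs => rw [pvF]
    simp only [dif_neg (by omega : ¬ start > e), dif_neg (by omega : ¬ start = e)]
    rfl
  rw [hkey]
  intro i j
  rw [PySem.Dict.getD_insert]
  by_cases hpk : (i, j) = (start, e)
  · rw [if_pos hpk]
    have hi : i = start := (Prod.mk.injEq _ _ _ _ ▸ hpk).1
    have hj : j = e := (Prod.mk.injEq _ _ _ _ ▸ hpk).2
    subst hi; subst hj
    rw [if_pos (Or.inr ⟨rfl, by omega, by omega⟩)]
  · rw [if_neg hpk, hrow i j]
    by_cases hc : (start + 1 ≤ i ∧ i ≤ j ∧ j < n) ∨ (i = start ∧ start ≤ j ∧ j < e)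
    · rw [if_pos hc, if_pos (by
        rcases hc with h | ⟨h1, h2, h3⟩
        exacts [Or.inl h, Or.inr ⟨h1, h2, by omega⟩])]
    · rw [if_neg hc, if_neg (by
        rintro (h | ⟨h1, h2, h3⟩)
        · exact hc (Or.inl h)
        · by_cases hje : j = e
          · exact hpk (by rw [h1, hje])
          · exact hc (Or.inr ⟨h1, h2, by omega⟩))]

theorem pvRow_all (cs : List Char) (n start : Int)
    (dp : PySem.Dict (Int × Int) Int) (h0 : 0 ≤ start) (h1 : start < n)
    (htbl : TblOk cs n (start + 1) dp) : TblOk cs n start (pvRowB cs n dp start) := by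
  rw [pvRowB_eq]
  have hinit : RowOk cs n start (start + 1) (PySem.Dict.insert dp (start, start) 1) := by
    intro i j
    rw [PySem.Dict.getD_insert]
    by_cases hpk : (i, j) = (start, start)
    · rw [if_pos hpk]
      have hi : i = start := (Prod.mk.injEq _ _ _ _ ▸ hpk).1
      have hj : j = start := (Prod.mk.injEq _ _ _ _ ▸ hpk).2
      subst hi; subst hj
      rw [if_pos (Or.inr ⟨rfl, by omega, by omega⟩), pvF]
      simp
    · rw [if_neg hpk, htbl i j]
      by_cases hc : start + 1 ≤ i ∧ i ≤ j ∧ j < n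
      · rw [if_pos hc, if_pos (Or.inl hc)]
      · rw [if_neg hc, if_neg (by
          rintro (h | ⟨h1, h2, h3⟩)
          · exact hc h
          · exact hpk (by rw [h1, show j = start by omega]))]
  have haux : ∀ (m : Nat) (e : Int) (dp : PySem.Dict (Int × Int) Int),
      (n - e).toNat = m → start + 1 ≤ e → e ≤ n → RowOk cs n start e dp →
      RowOk cs n start n ((PySem.List.pyRange e n 1).foldl (pvBody cs n start) dp) := by
    intro m
    induction m with
    | zero =>
      intro e dp hm he1 he2 hrow
      rw [PySem.List.pyRange_one_eq_nil (by omega)]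
      simpa [show e = n by omega] using hrow
    | succ m ih =>
      intro e dp hm he1 he2 hrow
      rw [PySem.List.pyRange_one_cons (by omega)]
      simp only [List.foldl_cons]
      exact ih (e + 1) _ (by omega) (by omega) (by omega)
        (pvBody_step cs n start e dp he1 (by omega) hrow)
  have hfin := haux (n - (start + 1)).toNat (start + 1) _ rfl (by omega) (by omega) hinit
  intro i j
  rw [hfin i j]
  by_cases hc : start ≤ i ∧ i ≤ j ∧ j < n
  · rw [if_pos hc, if_pos (by
      by_cases hi : i = start
      exacts [Or.inr ⟨hi, by omega, by omega⟩, Or.inl ⟨by omega, hc.2.1, hc.2.2⟩])]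
  · rw [if_neg hc, if_neg (by
      rintro (⟨h1, h2, h3⟩ | ⟨h1, h2, h3⟩) <;> exact hc ⟨by omega, by omega, by omega⟩)]

theorem pvRows (cs : List Char) (n : Int) :
    ∀ (m : Nat) (dp : PySem.Dict (Int × Int) Int), ((m : Int)) < n →
      TblOk cs n ((m : Int) + 1) dp →
      TblOk cs n 0 ((PySem.List.pyRange (m : Int) (-1) (-1)).foldl (pvRowB cs n) dp) := by
  intro m
  induction m with
  | zero =>
    intro dp hlt htbl
    rw [PySem.List.pyRange_neg_one_cons (by omega)]
    rw [show ((0 : Nat) : Int) - 1 = -1 by omega, PySem.List.pyRange_neg_one_eq_nil (by omega)]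
    simpa using pvRow_all cs n 0 dp (by omega) (by exact_mod_cast hlt) (by simpa using htbl)
  | succ m ih =>
    intro dp hlt htbl
    rw [PySem.List.pyRange_neg_one_cons (by omega)]
    simp only [List.foldl_cons]
    have hrow := pvRow_all cs n ((m + 1 : Nat) : Int) dp (by positivity) hlt htbl
    have hc : ((m + 1 : Nat) : Int) - 1 = ((m : Nat) : Int) := by push_cast; ring
    rw [hc]
    exact ih _ (by omega) (by rw [show ((m : Nat) : Int) + 1 = ((m + 1 : Nat) : Int) by push_cast; ring]; exact hrow)

theorem pvAlt_eq_pvF (s : String) :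
    min_steps_to_delete_string_alt s = pvF s.toList 0 ((s.toList.length : Int) - 1) := by
  unfold min_steps_to_delete_string_alt
  by_cases hz : (s.toList.length : Int) = 0
  · rw [pvF_of_gt _ _ _ (by omega)]
    have h0 : s = "" := by simpa using hz
    simp [h0]
  · simp only [if_neg hz]
    have hn : 1 ≤ (s.toList.length : Int) := by
      have : 0 ≤ (s.toList.length : Int) := by positivity
      omega
    have hm : ((s.toList.length - 1 : Nat) : Int) = (s.toList.length : Int) - 1 := by
      omega
    have hfinal := pvRows s.toList (s.toList.length : Int) (s.toList.length - 1)
      PySem.Dict.empty (by omega)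
      (by
        intro i j
        rw [PySem.Dict.getD_empty]
        rw [if_neg (by omega)])
    rw [hm] at hfinal
    rw [hfinal 0 ((s.toList.length : Int) - 1), if_pos (by omega)]

-- ===== VERDICT (by name: the statement is the Claim_ definition above) =====
theorem min_steps_to_delete_string_spec : Claim_equal_min_steps_to_delete_string := by
  intro s _
  unfold Spec_min_steps_to_delete_string
  rw [pvAlt_eq_pvF]
  unfold min_steps_to_delete_string
  exact (pvSolve_correct s.toList 0 ((s.toList.length : Int) - 1) PySem.Dict.empty
    (by intro p hp; simp [PySem.Dict.getD_empty] at hp)).1
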